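-- pv_equiv track=rewrite | github.com/PatrickSheehan053/SPORE | label_detection.py | _score_col
-- ===== SOURCE A (Python) =====
-- def _col_lower(name):
--     return name.lower().replace("-", "_").replace(" ", "_")
--
-- def _score_col(name, vocab):
--     nl = _col_lower(name)
--     for i, v in enumerate(vocab):
--         if nl == v:
--             return 1000 - i   # exact match: higher score for earlier vocab entries
--     for i, v in enumerate(vocab):
--         if v in nl or nl in v:
--             return 500 - i
--     for i, v in enumerate(vocab):
--         for token in nl.split("_"):
--             if token == v:
--                 return 200 - i
--     return 0
-- ===== SOURCE B (Python) =====
-- def _col_lower(name):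
--     return name.lower().replace("-", "_").replace(" ", "_")
--
-- def _score_col(name, vocab):
--     nl = _col_lower(name)
--     toks = nl.split("_")
--     first_sub = None
--     first_tok = None
--     for i, v in enumerate(vocab):
--         if nl == v:
--             return 1000 - i
--         if first_sub is None and (v in nl or nl in v):
--             first_sub = i
--         if first_tok is None and v in toks:
--             first_tok = i
--     if first_sub is not None:
--         return 500 - first_sub
--     if first_tok is not None:
--         return 200 - first_tok
--     return 0
-- ===== Notes on version B (the rewrite author's own statement) =====
-- stated objective: alternative
-- what changed: Replaced A's three sequential full scans of vocab by a single pass that returns immediately on an exact match and records the first index of the substring and token tiers, resolving by tier after the loop.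
import Mathlib
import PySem

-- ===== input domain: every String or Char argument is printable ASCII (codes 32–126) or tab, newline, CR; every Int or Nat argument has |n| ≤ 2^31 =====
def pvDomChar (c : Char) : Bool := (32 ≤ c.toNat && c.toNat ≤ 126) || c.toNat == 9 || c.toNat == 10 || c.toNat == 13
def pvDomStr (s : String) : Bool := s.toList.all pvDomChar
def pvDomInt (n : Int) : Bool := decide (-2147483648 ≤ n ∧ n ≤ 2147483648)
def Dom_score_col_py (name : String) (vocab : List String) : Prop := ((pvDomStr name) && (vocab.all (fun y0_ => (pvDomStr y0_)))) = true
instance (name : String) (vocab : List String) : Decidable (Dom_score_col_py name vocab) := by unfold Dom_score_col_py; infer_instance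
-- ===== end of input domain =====

-- B is an alternative single-pass implementation of A's three sequential scans; same cost, proved equal everywhere.

-- ===== PORT A =====
-- _col_lower(name) = name.lower().replace("-", "_").replace(" ", "_")
def pvColLower (name : String) : String :=
  PySem.Str.replace (PySem.Str.replace (PySem.Str.lower name) "-" "_") " " "_"

-- first loop: for i, v: if nl == v: return 1000 - i
def pvALoop1 (nl : String) : List String → Int → Option Int
  | [], _ => none
  | v :: rest, i => if nl == v then some (1000 - i) else pvALoop1 nl rest (i + 1)

-- second loop: for i, v: if v in nl or nl in v: return 500 - i
def pvALoop2 (nl : String) : List String → Int → Option Int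
  | [], _ => none
  | v :: rest, i =>
      if PySem.Str.isIn v nl || PySem.Str.isIn nl v then some (500 - i)
      else pvALoop2 nl rest (i + 1)

-- nl.split("_"): sep = "_" is nonempty, so Python's split never raises (split? is some here)
def pvSplitTokens (nl : String) : List String :=
  (PySem.Str.split? nl "_").getD []

-- inner loop of the third scan: for token in toks: if token == v: return (found)
def pvTokenMatch (toks : List String) (v : String) : Bool :=
  match toks with
  | [] => false
  | t :: rest => if t == v then true else pvTokenMatch rest v

-- third loop: for i, v: for token in nl.split("_"): if token == v: return 200 - i
def pvALoop3 (nl : String) : List String → Int → Option Int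
  | [], _ => none
  | v :: rest, i =>
      if pvTokenMatch (pvSplitTokens nl) v then some (200 - i)
      else pvALoop3 nl rest (i + 1)

def score_col_py (name : String) (vocab : List String) : Int :=
  let nl := pvColLower name
  match pvALoop1 nl vocab 0 with
  | some r => r
  | none =>
    match pvALoop2 nl vocab 0 with
    | some r => r
    | none =>
      match pvALoop3 nl vocab 0 with
      | some r => r
      | none => 0

-- ===== PORT B =====
-- single pass: return 1000-i at the first exact match, otherwise record the first
-- substring-tier index and the first token-tier index, and resolve by tier afterwards
def pvBLoop (nl : String) (toks : List String) :
    List String → Int → Option Int → Option Int → Int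
  | [], _, firstSub, firstTok =>
      match firstSub with
      | some j => 500 - j
      | none =>
        match firstTok with
        | some j => 200 - j
        | none => 0
  | v :: rest, i, firstSub, firstTok =>
      if nl == v then 1000 - i
      else
        pvBLoop nl toks rest (i + 1)
          (if firstSub = none ∧ (PySem.Str.isIn v nl || PySem.Str.isIn nl v) then some i else firstSub)
          (if firstTok = none ∧ toks.contains v then some i else firstTok)

def score_col_py_alt (name : String) (vocab : List String) : Int :=
  let nl := pvColLower name
  let toks := pvSplitTokens nl
  pvBLoop nl toks vocab 0 none none

-- ===== PRECONDITION & SPEC =====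
def Spec_score_col_py (name : String) (vocab : List String) (out : Int) : Prop := out = score_col_py_alt name vocab
instance (name : String) (vocab : List String) (out : Int) : Decidable (Spec_score_col_py name vocab out) := by unfold Spec_score_col_py; infer_instance

-- ===== CLAIM (what is proved, stated in full; the proofs are below) =====
def Claim_equal_score_col_py : Prop := ∀ (name : String) (vocab : List String), Dom_score_col_py name vocab → Spec_score_col_py name vocab (score_col_py name vocab)

-- ===== LEMMAS AND PROOFS =====

theorem pvTokenMatch_eq_contains (toks : List String) (v : String) :
    pvTokenMatch toks v = toks.contains v := by
  induction toks with
  | nil => rfl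
  | cons t rest ih =>
      cases h : (t == v) with
      | true =>
          have ht : t = v := eq_of_beq h
          subst ht
          simp [pvTokenMatch]
      | false =>
          have hne : ¬ v = t := fun e => by simp [e] at h
          simp [pvTokenMatch, h, ih, hne]

-- loop invariant: B's single pass equals A's tiered scan chain, for any carried state
theorem pvBLoop_eq (nl : String) (vs : List String) :
    ∀ (i : Int) (firstSub firstTok : Option Int),
    pvBLoop nl (pvSplitTokens nl) vs i firstSub firstTok =
      match pvALoop1 nl vs i with
      | some r => r
      | none =>
        match firstSub with
        | some j => 500 - j
        | none =>
          match pvALoop2 nl vs i with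
          | some r => r
          | none =>
            match firstTok with
            | some j => 200 - j
            | none =>
              match pvALoop3 nl vs i with
              | some r => r
              | none => 0 := by
  induction vs with
  | nil => intro i fs ft; rfl
  | cons v rest ih =>
      intro i fs ft
      by_cases hx : nl == v
      · simp [pvBLoop, pvALoop1, hx]
      · simp only [pvBLoop, pvALoop1, pvALoop2, pvALoop3, hx, ih,
          pvTokenMatch_eq_contains]
        by_cases h3 : v ∈ pvSplitTokens nl <;>
          by_cases h2 : PySem.Chars.isIn v.toList nl.toList = true ∨
              PySem.Chars.isIn nl.toList v.toList = true <;>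
          cases fs <;> cases ft <;>
          cases hA : pvALoop1 nl rest (i + 1) <;>
          cases hB : pvALoop2 nl rest (i + 1) <;>
          cases hC : pvALoop3 nl rest (i + 1) <;>
          simp [h2, h3, hA, hB, hC]

-- ===== VERDICT (by name: the statement is the Claim_ definition above) =====
theorem score_col_py_spec : Claim_equal_score_col_py := by
  intro name vocab _
  unfold Spec_score_col_py score_col_py score_col_py_alt
  rw [pvBLoop_eq]
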